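-- pv_equiv track=rewrite | github.com/ejrbuss/dominos | dominos.py | get_best_sequence
-- ===== SOURCE A (Python) =====
-- def other(domino, side):
--     return domino[1] if domino[0] == side else domino[0]
--
-- def domino_score(domino):
--     return domino[0] + domino[1]
--
-- def domino_double(domino):
--     return domino[0] == domino[1]
--
-- def get_best_sequence(dominos, match):
--     choices = []
--     for (i, domino) in enumerate(dominos):
--         if domino[0] == match or domino[1] == match:
--             new_dominos  = dominos[:i] + dominos[i + 1:]
--             new_match    = other(domino, match)
--             (seq, score) = get_best_sequence(new_dominos, new_match)
--             if score != 0 or not domino_double(domino):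
--                 choices.append(([domino] + seq, score + domino_score(domino)))
--     best_score = 0
--     best_seq = []
--     for (seq, score) in choices:
--         if score > best_score:
--             (best_score, best_seq) = (score, seq)
--     return (best_seq, best_score)
-- ===== SOURCE B (Python) =====
-- def get_best_sequence(dominos, match):
--     # Memoized recursion: cache result for each (remaining-dominoes tuple, match) key,
--     # tracking the best chain inline instead of collecting all choices.
--     memo = {}
--     def solve(ds, m):
--         key = (ds, m)
--         if key in memo:
--             return memo[key]
--         best_seq, best_score = [], 0
--         for i, (a, b) in enumerate(ds):
--             if a == m or b == m:
--                 seq, score = solve(ds[:i] + ds[i + 1:], b if a == m else a)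
--                 if score != 0 or a != b:
--                     total = score + a + b
--                     if total > best_score:
--                         best_seq, best_score = [(a, b)] + seq, total
--         memo[key] = (best_seq, best_score)
--         return memo[key]
--     seq, score = solve(tuple(dominos), match)
--     return ([tuple(d) for d in seq], score)
-- ===== Notes on version B (the rewrite author's own statement) =====
-- stated objective: faster
-- what changed: B memoizes the recursion on the (remaining-dominoes tuple, match) key and keeps the running best chain inline instead of building a choices list and scanning it, turning A's factorial recursion tree into a cached one.
import Mathlib
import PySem

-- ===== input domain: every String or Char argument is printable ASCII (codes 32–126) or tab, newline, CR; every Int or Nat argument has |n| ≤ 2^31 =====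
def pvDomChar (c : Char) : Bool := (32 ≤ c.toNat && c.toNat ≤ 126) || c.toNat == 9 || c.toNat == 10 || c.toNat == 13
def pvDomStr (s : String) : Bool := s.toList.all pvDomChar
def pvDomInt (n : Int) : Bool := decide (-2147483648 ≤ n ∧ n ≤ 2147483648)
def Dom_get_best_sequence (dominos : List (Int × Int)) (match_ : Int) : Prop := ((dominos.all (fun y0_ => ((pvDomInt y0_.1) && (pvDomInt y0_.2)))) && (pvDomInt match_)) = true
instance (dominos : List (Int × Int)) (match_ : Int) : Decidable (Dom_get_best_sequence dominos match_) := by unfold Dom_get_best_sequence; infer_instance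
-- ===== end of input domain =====

-- B memoizes the recursion on the (remaining-dominoes tuple, match) key and tracks the best
-- chain inline instead of collecting all choices: one evaluation per reachable key.

-- ===== PORT A =====
def pyOther (domino : Int × Int) (side : Int) : Int :=
  if domino.1 = side then domino.2 else domino.1

def pyDominoScore (domino : Int × Int) : Int := domino.1 + domino.2

def pyDominoDouble (domino : Int × Int) : Bool := domino.1 == domino.2

-- Python A's recursion always removes exactly one domino, so `dominos.length` is exact fuel;
-- enumerate indices are ≥ 0, so the slices dominos[:i] / dominos[i+1:] are take/drop (exact).
def gbsAux : Nat → List (Int × Int) → Int → (List (Int × Int)) × Int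
  | 0, _, _ => ([], 0)
  | fuel + 1, dominos, m =>
    let choices := (PySem.List.enumerate dominos).foldl
      (fun (choices : List ((List (Int × Int)) × Int)) p =>
        let domino := p.2
        if domino.1 = m ∨ domino.2 = m then
          let new_dominos := dominos.take p.1.toNat ++ dominos.drop (p.1.toNat + 1)
          let new_match := pyOther domino m
          let r := gbsAux fuel new_dominos new_match
          if r.2 ≠ 0 ∨ ¬ pyDominoDouble domino then
            choices ++ [(domino :: r.1, r.2 + pyDominoScore domino)]
          else choices
        else choices) []
    choices.foldl (fun best c => if c.2 > best.2 then (c.1, c.2) else best) ([], 0)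

def get_best_sequence (dominos : List (Int × Int)) (match_ : Int) : (List (Int × Int)) × Int :=
  gbsAux dominos.length dominos match_

-- ===== PORT B =====
-- The memo dict of Source B, threaded explicitly; keys are (remaining list, match).
-- Fuel = length of the remaining list, exact as in port A.
def solveB : Nat → PySem.Dict ((List (Int × Int)) × Int) ((List (Int × Int)) × Int) →
    List (Int × Int) → Int →
    ((List (Int × Int)) × Int) × PySem.Dict ((List (Int × Int)) × Int) ((List (Int × Int)) × Int)
  | 0, memo, _, _ => (([], 0), memo)
  | fuel + 1, memo, ds, m =>
    match memo.get? (ds, m) with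
    | some v => (v, memo)
    | none =>
      let st := (PySem.List.enumerate ds).foldl
        (fun (st : ((List (Int × Int)) × Int) ×
                   PySem.Dict ((List (Int × Int)) × Int) ((List (Int × Int)) × Int)) p =>
          let a := p.2.1
          let b := p.2.2
          if a = m ∨ b = m then
            let r := solveB fuel st.2 (ds.take p.1.toNat ++ ds.drop (p.1.toNat + 1))
                       (if a = m then b else a)
            if r.1.2 ≠ 0 ∨ a ≠ b then
              let total := r.1.2 + a + b
              if total > st.1.2 then (((a, b) :: r.1.1, total), r.2) else (st.1, r.2)
            else (st.1, r.2)
          else st) (([], 0), memo)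
      (st.1, st.2.insert (ds, m) st.1)

-- Source B's final `[tuple(d) for d in seq]` is the identity on a list of pairs.
def get_best_sequence_alt (dominos : List (Int × Int)) (match_ : Int) : (List (Int × Int)) × Int :=
  (solveB dominos.length PySem.Dict.empty dominos match_).1

-- ===== PRECONDITION & SPEC =====
def Spec_get_best_sequence (dominos : List (Int × Int)) (match_ : Int) (out : (List (Int × Int)) × Int) : Prop := out = get_best_sequence_alt dominos match_
instance (dominos : List (Int × Int)) (match_ : Int) (out : (List (Int × Int)) × Int) : Decidable (Spec_get_best_sequence dominos match_ out) := by unfold Spec_get_best_sequence; infer_instance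

-- ===== CLAIM (what is proved, stated in full; the proofs are below) =====
def Claim_equal_get_best_sequence : Prop := ∀ (dominos : List (Int × Int)) (match_ : Int), Dom_get_best_sequence dominos match_ → Spec_get_best_sequence dominos match_ (get_best_sequence dominos match_)

-- ===== LEMMAS AND PROOFS =====

-- The value both programs compute, as A computes it.
def specA (ds : List (Int × Int)) (m : Int) : (List (Int × Int)) × Int :=
  gbsAux ds.length ds m

-- The fused "keep the running best" step, on the pure values.
def pureStep (ds : List (Int × Int)) (m : Int)
    (best : (List (Int × Int)) × Int) (p : Int × (Int × Int)) : (List (Int × Int)) × Int :=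
  if p.2.1 = m ∨ p.2.2 = m then
    let r := specA (ds.take p.1.toNat ++ ds.drop (p.1.toNat + 1)) (pyOther p.2 m)
    if r.2 ≠ 0 ∨ ¬ pyDominoDouble p.2 then
      if r.2 + pyDominoScore p.2 > best.2 then (p.2 :: r.1, r.2 + pyDominoScore p.2) else best
    else best
  else best

theorem gbsAux_nil (f : Nat) (m : Int) : gbsAux f [] m = ([], 0) := by
  cases f <;> simp [gbsAux, PySem.List.enumerate]

theorem sub_length (ds : List (Int × Int)) (k : Nat) (h : k < ds.length) :
    (ds.take k ++ ds.drop (k + 1)).length = ds.length - 1 := by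
  simp [List.length_take, List.length_drop]
  omega

theorem enum_mem_lt (ds : List (Int × Int)) (p : Int × (Int × Int))
    (hp : p ∈ PySem.List.enumerate ds) : p.1.toNat < ds.length ∧ (0 : Int) ≤ p.1 := by
  rcases (PySem.List.mem_enumerate_iff ds 0 p).1 hp with ⟨k, hk, rfl⟩
  simp
  omega

theorem gbsAux_fuel : ∀ (f1 f2 : Nat) (ds : List (Int × Int)) (m : Int),
    ds.length ≤ f1 → ds.length ≤ f2 → gbsAux f1 ds m = gbsAux f2 ds m := by
  intro f1
  induction f1 with
  | zero =>
    intro f2 ds m h1 _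
    have : ds = [] := by cases ds <;> simp_all
    subst this
    rw [gbsAux_nil, gbsAux_nil]
  | succ n ih =>
    intro f2 ds m h1 h2
    cases f2 with
    | zero =>
      have : ds = [] := by cases ds <;> simp_all
      subst this
      rw [gbsAux_nil, gbsAux_nil]
    | succ n2 =>
      show gbsAux (n + 1) ds m = gbsAux (n2 + 1) ds m
      simp only [gbsAux]
      congr 1
      apply PySem.List.foldl_congr_mem
      intro acc p hp
      obtain ⟨hlt, _⟩ := enum_mem_lt ds p hp
      have hlen := sub_length ds p.1.toNat hlt
      by_cases hc : p.2.1 = m ∨ p.2.2 = m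
      · simp only [if_pos hc]
        rw [ih n2 (ds.take p.1.toNat ++ ds.drop (p.1.toNat + 1)) (pyOther p.2 m)
              (by omega) (by omega)]
      · simp [if_neg hc]

theorem gbsAux_eq_spec (f : Nat) (ds : List (Int × Int)) (m : Int) (h : ds.length ≤ f) :
    gbsAux f ds m = specA ds m :=
  gbsAux_fuel f ds.length ds m h le_rfl

-- maxfold over an optionally-appended candidate list fuses into one pass
theorem maxfold_flatMap (g : Int × (Int × Int) → List ((List (Int × Int)) × Int))
    (step : (List (Int × Int)) × Int → Int × (Int × Int) → (List (Int × Int)) × Int)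
    (hg : ∀ b p, (g p).foldl (fun best c => if c.2 > best.2 then (c.1, c.2) else best) b = step b p) :
    ∀ (l : List (Int × (Int × Int))) (b : (List (Int × Int)) × Int),
    (l.flatMap g).foldl (fun best c => if c.2 > best.2 then (c.1, c.2) else best) b =
      l.foldl step b := by
  intro l
  induction l with
  | nil => intro b; simp
  | cons p l ih =>
    intro b
    simp only [List.flatMap_cons, List.foldl_append, List.foldl_cons]
    rw [hg b p, ih]

-- A computes the fused one-pass fold of pureStep over the enumeration.
theorem A_onepass (ds : List (Int × Int)) (m : Int) :
    specA ds m = (PySem.List.enumerate ds).foldl (pureStep ds m) ([], 0) := by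
  cases hds : ds with
  | nil => simp [specA, gbsAux_nil, PySem.List.enumerate]
  | cons d tl =>
    have hlen : ds.length = tl.length + 1 := by rw [hds]; simp
    rw [← hds]
    show gbsAux ds.length ds m = _
    rw [hlen]
    simp only [gbsAux]
    -- rewrite the choices-building fold as a flatMap
    have hch : ∀ (l : List (Int × (Int × Int))) (acc : List ((List (Int × Int)) × Int)),
        l.foldl (fun (choices : List ((List (Int × Int)) × Int)) p =>
          let domino := p.2
          if domino.1 = m ∨ domino.2 = m then
            let new_dominos := ds.take p.1.toNat ++ ds.drop (p.1.toNat + 1)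
            let new_match := pyOther domino m
            let r := gbsAux tl.length new_dominos new_match
            if r.2 ≠ 0 ∨ ¬ pyDominoDouble domino then
              choices ++ [(domino :: r.1, r.2 + pyDominoScore domino)]
            else choices
          else choices) acc
        = acc ++ l.flatMap (fun p =>
            if p.2.1 = m ∨ p.2.2 = m then
              let r := gbsAux tl.length (ds.take p.1.toNat ++ ds.drop (p.1.toNat + 1)) (pyOther p.2 m)
              if r.2 ≠ 0 ∨ ¬ pyDominoDouble p.2 then
                [(p.2 :: r.1, r.2 + pyDominoScore p.2)]
              else []
            else []) := by
      intro l
      induction l with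
      | nil => intro acc; simp
      | cons p l ih =>
        intro acc
        simp only [List.foldl_cons, List.flatMap_cons]
        rw [ih]
        by_cases hc : p.2.1 = m ∨ p.2.2 = m
        · simp only [if_pos hc]
          by_cases hr : (gbsAux tl.length (ds.take p.1.toNat ++ ds.drop (p.1.toNat + 1)) (pyOther p.2 m)).2 ≠ 0 ∨ ¬ pyDominoDouble p.2
          · simp only [if_pos hr, List.append_assoc]
          · simp only [if_neg hr, List.nil_append]
        · simp [if_neg hc]
    rw [hch, List.nil_append]
    rw [maxfold_flatMap _ (fun best p =>
        if p.2.1 = m ∨ p.2.2 = m then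
          let r := gbsAux tl.length (ds.take p.1.toNat ++ ds.drop (p.1.toNat + 1)) (pyOther p.2 m)
          if r.2 ≠ 0 ∨ ¬ pyDominoDouble p.2 then
            if r.2 + pyDominoScore p.2 > best.2 then (p.2 :: r.1, r.2 + pyDominoScore p.2) else best
          else best
        else best)
      (by
        intro b p
        by_cases hc : p.2.1 = m ∨ p.2.2 = m
        · simp only [if_pos hc]
          by_cases hr : (gbsAux tl.length (ds.take p.1.toNat ++ ds.drop (p.1.toNat + 1)) (pyOther p.2 m)).2 ≠ 0 ∨ ¬ pyDominoDouble p.2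
          · simp only [if_pos hr, List.foldl_cons, List.foldl_nil]
          · simp only [if_neg hr, List.foldl_nil]
        · simp [if_neg hc])]
    apply PySem.List.foldl_congr_mem
    intro best p hp
    obtain ⟨hlt, _⟩ := enum_mem_lt ds p hp
    have hlen2 : (ds.take p.1.toNat ++ ds.drop (p.1.toNat + 1)).length = tl.length := by
      rw [sub_length ds p.1.toNat hlt, hlen]
      omega
    unfold pureStep
    by_cases hc : p.2.1 = m ∨ p.2.2 = m
    · simp only [if_pos hc]
      rw [gbsAux_eq_spec tl.length _ _ (le_of_eq hlen2)]
    · simp [if_neg hc]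

def GoodMemo (memo : PySem.Dict ((List (Int × Int)) × Int) ((List (Int × Int)) × Int)) : Prop :=
  ∀ k v, memo.get? k = some v → v = specA k.1 k.2

-- B's fold step, named so the lemmas below can speak about it.
def stepBfn (n : Nat) (ds : List (Int × Int)) (m : Int)
    (st : ((List (Int × Int)) × Int) ×
          PySem.Dict ((List (Int × Int)) × Int) ((List (Int × Int)) × Int))
    (p : Int × (Int × Int)) :
    ((List (Int × Int)) × Int) ×
      PySem.Dict ((List (Int × Int)) × Int) ((List (Int × Int)) × Int) :=
  let a := p.2.1
  let b := p.2.2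
  if a = m ∨ b = m then
    let r := solveB n st.2 (ds.take p.1.toNat ++ ds.drop (p.1.toNat + 1))
               (if a = m then b else a)
    if r.1.2 ≠ 0 ∨ a ≠ b then
      let total := r.1.2 + a + b
      if total > st.1.2 then (((a, b) :: r.1.1, total), r.2) else (st.1, r.2)
    else (st.1, r.2)
  else st

theorem solveB_succ (n : Nat) memo (ds : List (Int × Int)) (m : Int) :
    solveB (n + 1) memo ds m =
      match memo.get? (ds, m) with
      | some v => (v, memo)
      | none =>
        let st := (PySem.List.enumerate ds).foldl (stepBfn n ds m) (([], 0), memo)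
        (st.1, st.2.insert (ds, m) st.1) := rfl

theorem stepB_spec (n : Nat) (ds : List (Int × Int)) (m : Int)
    (ih : ∀ (ds' : List (Int × Int)) (m' : Int) memo', GoodMemo memo' → ds'.length ≤ n →
      (solveB n memo' ds' m').1 = specA ds' m' ∧ GoodMemo (solveB n memo' ds' m').2)
    (st : ((List (Int × Int)) × Int) ×
          PySem.Dict ((List (Int × Int)) × Int) ((List (Int × Int)) × Int))
    (p : Int × (Int × Int)) (hst : GoodMemo st.2)
    (hlt : p.1.toNat < ds.length) (hn : ds.length ≤ n + 1) :
    (stepBfn n ds m st p).1 = pureStep ds m st.1 p ∧ GoodMemo (stepBfn n ds m st p).2 := by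
  have hlen2 : (ds.take p.1.toNat ++ ds.drop (p.1.toNat + 1)).length ≤ n := by
    rw [sub_length ds p.1.toNat hlt]; omega
  by_cases hc : p.2.1 = m ∨ p.2.2 = m
  · obtain ⟨hr1, hr2⟩ := ih (ds.take p.1.toNat ++ ds.drop (p.1.toNat + 1))
      (if p.2.1 = m then p.2.2 else p.2.1) st.2 hst hlen2
    unfold stepBfn pureStep
    simp only [if_pos hc]
    have hoth : pyOther p.2 m = (if p.2.1 = m then p.2.2 else p.2.1) := rfl
    rw [hoth, hr1]
    have hdd : (¬ pyDominoDouble p.2 = true) = (p.2.1 ≠ p.2.2) := by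
      simp [pyDominoDouble]
    have hsc : ∀ x : Int, x + p.2.1 + p.2.2 = x + pyDominoScore p.2 := by
      intro x; simp [pyDominoScore]; ring
    constructor
    · simp only [hdd, hsc]
      split_ifs <;> simp
    · generalize hM : (solveB n st.2 (ds.take p.1.toNat ++ ds.drop (p.1.toNat + 1))
        (if p.2.1 = m then p.2.2 else p.2.1)).2 = M at hr2 ⊢
      split_ifs <;> exact hr2
  · unfold stepBfn pureStep
    simp only [if_neg hc]
    exact ⟨by trivial, hst⟩

theorem foldB_spec (n : Nat) (ds : List (Int × Int)) (m : Int)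
    (ih : ∀ (ds' : List (Int × Int)) (m' : Int) memo', GoodMemo memo' → ds'.length ≤ n →
      (solveB n memo' ds' m').1 = specA ds' m' ∧ GoodMemo (solveB n memo' ds' m').2)
    (hn : ds.length ≤ n + 1) :
    ∀ (l : List (Int × (Int × Int))), (∀ p ∈ l, p.1.toNat < ds.length) →
    ∀ st, GoodMemo st.2 →
      (l.foldl (stepBfn n ds m) st).1 = l.foldl (pureStep ds m) st.1 ∧
      GoodMemo (l.foldl (stepBfn n ds m) st).2 := by
  intro l
  induction l with
  | nil => intro _ st hst; exact ⟨rfl, hst⟩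
  | cons p l ihl =>
    intro hmem st hst
    have hp := hmem p (List.mem_cons_self)
    obtain ⟨h1, h2⟩ := stepB_spec n ds m ih st p hst hp hn
    simp only [List.foldl_cons]
    obtain ⟨h3, h4⟩ := ihl (fun q hq => hmem q (List.mem_cons_of_mem p hq)) (stepBfn n ds m st p) h2
    exact ⟨by rw [h3, h1], h4⟩

theorem B_main : ∀ (fuel : Nat) (ds : List (Int × Int)) (m : Int) memo,
    GoodMemo memo → ds.length ≤ fuel →
    (solveB fuel memo ds m).1 = specA ds m ∧ GoodMemo (solveB fuel memo ds m).2 := by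
  intro fuel
  induction fuel with
  | zero =>
    intro ds m memo hg h
    have : ds = [] := by cases ds <;> simp_all
    subst this
    refine ⟨?_, hg⟩
    simp [solveB, specA, gbsAux_nil]
  | succ n ih =>
    intro ds m memo hg h
    rw [solveB_succ]
    cases hmv : memo.get? (ds, m) with
    | some v =>
      exact ⟨hg (ds, m) v hmv, hg⟩
    | none =>
      simp only
      obtain ⟨h1, h2⟩ := foldB_spec n ds m ih h (PySem.List.enumerate ds)
        (fun p hp => (enum_mem_lt ds p hp).1) (([], 0), memo) hg
      constructor
      · rw [h1, ← A_onepass]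
      · intro k v hkv
        rw [PySem.Dict.get?_insert] at hkv
        split at hkv
        · rename_i hk
          subst hk
          simp only [Option.some.injEq] at hkv
          rw [← hkv, h1, ← A_onepass]
        · exact h2 k v hkv

-- ===== VERDICT (by name: the statement is the Claim_ definition above) =====
theorem get_best_sequence_spec : Claim_equal_get_best_sequence := by
  intro dominos match_ _
  unfold Spec_get_best_sequence get_best_sequence_alt
  have hg : GoodMemo PySem.Dict.empty := by
    intro k v hkv
    simp [PySem.Dict.get?_empty] at hkv
  obtain ⟨h1, _⟩ := B_main dominos.length dominos match_ PySem.Dict.empty hg le_rfl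
  rw [h1]
  rfl
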